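-- pv_equiv track=rewrite | github.com/oneonlee/Problem-Solving | amamov/실패율.py | filter_loser
-- ===== SOURCE A (Python) =====
-- def filter_loser(stages, cur_stage):
--     a, b = 0, 0
--     for stage in stages:
--         if stage >= cur_stage:
--             b += 1
--         if stage == cur_stage:
--             a += 1
--     return a, b
-- ===== SOURCE B (Python) =====
-- def filter_loser(stages, cur_stage):
--     cnt = {}
--     for s in stages:
--         cnt[s] = cnt.get(s, 0) + 1
--     return cnt.get(cur_stage, 0), sum(v for k, v in cnt.items() if k >= cur_stage)
-- ===== Notes on version B (the rewrite author's own statement) =====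
-- stated objective: alternative
-- what changed: B builds a frequency histogram (dict) in one pass, then reads the exact-match count directly and sums the frequencies of distinct stage values >= cur_stage, instead of testing two branches per element in a single accumulating loop.
import Mathlib
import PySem

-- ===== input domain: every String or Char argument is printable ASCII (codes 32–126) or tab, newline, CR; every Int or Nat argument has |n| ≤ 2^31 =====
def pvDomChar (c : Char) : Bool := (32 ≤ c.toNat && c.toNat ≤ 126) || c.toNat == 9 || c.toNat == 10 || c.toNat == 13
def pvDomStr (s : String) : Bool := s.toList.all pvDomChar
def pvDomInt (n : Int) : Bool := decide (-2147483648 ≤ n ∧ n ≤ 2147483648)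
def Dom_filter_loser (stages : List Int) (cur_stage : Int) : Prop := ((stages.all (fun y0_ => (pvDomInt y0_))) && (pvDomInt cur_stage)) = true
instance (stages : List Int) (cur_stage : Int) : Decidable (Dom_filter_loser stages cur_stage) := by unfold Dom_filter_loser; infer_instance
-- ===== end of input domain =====

-- B replaces A's two-branch accumulating loop by a dict histogram read back per distinct value (objective: alternative).

-- ===== PORT A =====
def filter_loser (stages : List Int) (cur_stage : Int) : Int × Int :=
  let ab := stages.foldl (fun (ab : Int × Int) stage =>
    let b := if stage ≥ cur_stage then ab.2 + 1 else ab.2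
    let a := if stage = cur_stage then ab.1 + 1 else ab.1
    (a, b)) (0, 0)
  ab

-- ===== PORT B =====
def filter_loser_alt (stages : List Int) (cur_stage : Int) : Int × Int :=
  let cnt : PySem.Dict Int Int := stages.foldl (fun d s => d.insert s (d.getD s 0 + 1)) PySem.Dict.empty
  (cnt.getD cur_stage 0,
   cnt.items.foldl (fun acc p => if p.1 ≥ cur_stage then acc + p.2 else acc) 0)

-- ===== PRECONDITION & SPEC =====
def Spec_filter_loser (stages : List Int) (cur_stage : Int) (out : Int × Int) : Prop := out = filter_loser_alt stages cur_stage
instance (stages : List Int) (cur_stage : Int) (out : Int × Int) : Decidable (Spec_filter_loser stages cur_stage out) := by unfold Spec_filter_loser; infer_instance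

-- ===== CLAIM (what is proved, stated in full; the proofs are below) =====
def Claim_equal_filter_loser : Prop := ∀ (stages : List Int) (cur_stage : Int), Dom_filter_loser stages cur_stage → Spec_filter_loser stages cur_stage (filter_loser stages cur_stage)

-- ===== LEMMAS AND PROOFS =====

-- A's loop computes (count of cur, count of ≥ cur)
theorem filter_loser_loop (stages : List Int) (c : Int) (init : Int × Int) :
    stages.foldl (fun (ab : Int × Int) stage =>
      let b := if stage ≥ c then ab.2 + 1 else ab.2
      let a := if stage = c then ab.1 + 1 else ab.1
      (a, b)) init
    = (init.1 + (stages.count c : Int), init.2 + (stages.countP (fun s => decide (c ≤ s)) : Int)) := by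
  induction stages generalizing init with
  | nil => simp
  | cons x xs ih =>
      simp only [List.foldl_cons, ih, List.count_cons, List.countP_cons, Prod.mk.injEq,
        ge_iff_le, beq_iff_eq, decide_eq_true_eq]
      constructor <;> split_ifs <;> push_cast <;> omega

-- the B-side sum loop, as a sum over the filtered value list
theorem foldl_if_sum (c : Int) (l : List (Int × Int)) (init : Int) :
    l.foldl (fun acc p => if p.1 ≥ c then acc + p.2 else acc) init
    = init + ((l.filter (fun p => decide (c ≤ p.1))).map (·.2)).sum := by
  induction l generalizing init with
  | nil => simp
  | cons p l ih =>
      simp only [List.foldl_cons, List.filter_cons, ge_iff_le, decide_eq_true_eq]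
      split_ifs with h <;> simp [ih] <;> try ring

theorem sum_map_split (l : List Int) (f g : Int → Int) :
    (l.map (fun k => f k + g k)).sum = (l.map f).sum + (l.map g).sum := by
  induction l with
  | nil => simp
  | cons x l ih => simp [ih]; ring

theorem sum_indicator (keys : List Int) (P : Int → Bool) (s : Int)
    (hnd : keys.Nodup) (hs : s ∈ keys) :
    ((keys.filter P).map (fun k => if s = k then (1 : Int) else 0)).sum
      = if P s then 1 else 0 := by
  induction keys with
  | nil => simp at hs
  | cons k ks ih =>
      simp only [List.nodup_cons] at hnd
      rcases List.mem_cons.mp hs with h | h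
      · subst h
        have hz : ((ks.filter P).map (fun k => if s = k then (1 : Int) else 0)).sum = 0 := by
          apply List.sum_eq_zero
          intro x hx
          simp only [List.mem_map, List.mem_filter] at hx
          obtain ⟨y, ⟨hy, _⟩, hxe⟩ := hx
          have : s ≠ y := fun h => hnd.1 (h ▸ hy)
          simp [← hxe, this]
        simp only [List.filter_cons]
        split_ifs with h <;> simp [hz]
      · have := ih hnd.2 h
        have hne : s ≠ k := fun he => hnd.1 (he ▸ h)
        simp only [List.filter_cons]
        split_ifs with hp <;> simp [this, hne] <;> simp_all

-- summing stages.count over the distinct keys ≥ c gives countP (c ≤ ·)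
theorem sum_counts (c : Int) (stages keys : List Int)
    (hnd : keys.Nodup) (hsub : ∀ x ∈ stages, x ∈ keys) :
    ((keys.filter (fun k => decide (c ≤ k))).map (fun k => (stages.count k : Int))).sum
      = (stages.countP (fun s => decide (c ≤ s)) : Int) := by
  induction stages with
  | nil => simp [List.sum_eq_zero]
  | cons s rest ih =>
      have hs : s ∈ keys := hsub s (by simp)
      have hrest : ∀ x ∈ rest, x ∈ keys := fun x hx => hsub x (List.mem_cons_of_mem _ hx)
      have hcount : ∀ k : Int, ((s :: rest).count k : Int)
          = (rest.count k : Int) + (if s = k then (1 : Int) else 0) := by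
        intro k
        rcases eq_or_ne s k with h | h <;> simp [h]
      calc ((keys.filter (fun k => decide (c ≤ k))).map (fun k => ((s :: rest).count k : Int))).sum
          = ((keys.filter (fun k => decide (c ≤ k))).map
              (fun k => (rest.count k : Int) + (if s = k then (1 : Int) else 0))).sum := by
            congr 1; apply List.map_congr_left; intro k _; exact hcount k
        _ = ((keys.filter (fun k => decide (c ≤ k))).map (fun k => (rest.count k : Int))).sum
              + ((keys.filter (fun k => decide (c ≤ k))).map (fun k => if s = k then (1 : Int) else 0)).sum :=
            sum_map_split _ _ _
        _ = ((rest.countP (fun x => decide (c ≤ x)) : Int))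
              + (if decide (c ≤ s) = true then (1 : Int) else 0) := by
            rw [ih hrest, sum_indicator keys (fun k => decide (c ≤ k)) s hnd hs]
        _ = ((s :: rest).countP (fun x => decide (c ≤ x)) : Int) := by
            simp only [List.countP_cons]
            push_cast
            ring

-- ===== VERDICT (by name: the statement is the Claim_ definition above) =====
theorem filter_loser_spec : Claim_equal_filter_loser := by
  intro stages cur _
  unfold Spec_filter_loser
  show filter_loser stages cur = filter_loser_alt stages cur
  unfold filter_loser filter_loser_alt
  simp only [PySem.Dict.foldl_insert_getD_add_one_eq_counter, filter_loser_loop,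
    PySem.Dict.getD_counter, PySem.Dict.items_counter, foldl_if_sum, zero_add]
  have hfm : ((PySem.Set.ofList stages).map (fun k => (k, (stages.count k : Int)))).filter
        (fun p => decide (cur ≤ p.1))
      = ((PySem.Set.ofList stages).filter (fun k => decide (cur ≤ k))).map
          (fun k => (k, (stages.count k : Int))) := by
    rw [List.filter_map]
    rfl
  rw [hfm, List.map_map]
  have := sum_counts cur stages (PySem.Set.ofList stages)
      (PySem.Set.nodup_ofList stages) (fun x hx => (PySem.Set.mem_ofList stages x).mpr hx)
  simp only [Function.comp_def]
  rw [this]
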